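-- pv_equiv track=rewrite | github.com/ugraveknight/Healslut-Master | WordSearch.py | GenDimensions
-- ===== SOURCE A (Python) =====
-- def GenDimensions(WordList,Difficulty,width=5,height=5):
-- 	for word in WordList:
-- 		if len(word) >= height or len(word) >= width:
-- 			width = len(word)+1
-- 			height = len(word)+5
-- 	if len(WordList) >= width:
-- 		width +=3
-- 	if Difficulty == 'TEST':
-- 		pass
-- 	elif Difficulty == 'EASY':
-- 		width = width+1
-- 		height = height+1
-- 	elif Difficulty == 'MEDIUM':
-- 		width = width+2
-- 		height = height+3
-- 	elif Difficulty == 'HARD':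
-- 		width = width+4
-- 		height = height+6
-- 	return width, height
-- ===== SOURCE B (Python) =====
-- def GenDimensions(WordList, Difficulty, width=5, height=5):
--     # grow-until-fit: repeatedly look for the first word that does not fit the
--     # current grid, resize the grid for it, and restart the check until all fit
--     def offender(w, h):
--         for word in WordList:
--             if len(word) >= w or len(word) >= h:
--                 return len(word)
--         return None
--     L = offender(width, height)
--     while L is not None:
--         width, height = L + 1, L + 5
--         L = offender(width, height)
--     if len(WordList) >= width:
--         width += 3
--     dw, dh = {'EASY': (1, 1), 'MEDIUM': (2, 3), 'HARD': (4, 6)}.get(Difficulty, (0, 0))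
--     return width + dw, height + dh
-- ===== Notes on version B (the rewrite author's own statement) =====
-- stated objective: alternative
-- what changed: Replaces A's single left-to-right pass with mutating running thresholds by a grow-until-fit fixpoint: find the first word that does not fit, resize for it, restart the scan until no word violates; the difficulty if/elif chain becomes a table lookup.
import Mathlib
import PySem

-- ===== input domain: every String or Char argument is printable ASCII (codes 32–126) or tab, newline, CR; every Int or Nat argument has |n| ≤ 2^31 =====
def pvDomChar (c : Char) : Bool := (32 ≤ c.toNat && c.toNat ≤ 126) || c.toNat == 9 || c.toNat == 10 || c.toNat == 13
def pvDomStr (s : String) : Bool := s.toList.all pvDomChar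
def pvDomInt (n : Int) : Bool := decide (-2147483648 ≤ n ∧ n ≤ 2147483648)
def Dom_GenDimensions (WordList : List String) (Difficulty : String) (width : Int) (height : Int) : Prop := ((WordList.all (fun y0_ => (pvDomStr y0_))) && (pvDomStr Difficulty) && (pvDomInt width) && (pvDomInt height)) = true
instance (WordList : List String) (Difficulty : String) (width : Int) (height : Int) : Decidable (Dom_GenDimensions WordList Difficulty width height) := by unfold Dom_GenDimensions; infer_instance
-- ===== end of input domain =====

-- B replaces A's single stateful pass by a grow-until-fit fixpoint loop (find the first
-- word that does not fit, resize, restart the scan) and the if/elif chain by a table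
-- lookup (objective: alternative).

-- ===== PORT A =====
def GenDimensions (WordList : List String) (Difficulty : String) (width : Int) (height : Int) : Int × Int :=
  let p := WordList.foldl
    (fun (p : Int × Int) (word : String) =>
      if (PySem.Str.len word : Int) ≥ p.2 ∨ (PySem.Str.len word : Int) ≥ p.1
      then ((PySem.Str.len word : Int) + 1, (PySem.Str.len word : Int) + 5)
      else p)
    (width, height)
  let w := if (WordList.length : Int) ≥ p.1 then p.1 + 3 else p.1
  let h := p.2
  if Difficulty = "TEST" then (w, h)
  else if Difficulty = "EASY" then (w + 1, h + 1)
  else if Difficulty = "MEDIUM" then (w + 2, h + 3)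
  else if Difficulty = "HARD" then (w + 4, h + 6)
  else (w, h)

-- ===== PORT B =====
-- Source B's inner 'offender': length of the first word not fitting a w×h grid
def pvOffender (WordList : List String) (w h : Int) : Option Int :=
  match WordList.find? (fun word => decide (w ≤ (PySem.Str.len word : Int)) || decide (h ≤ (PySem.Str.len word : Int))) with
  | none => none
  | some word => some ((PySem.Str.len word : Int))

-- Source B's while loop; the Nat argument is a fuel bound that merely makes the
-- recursion structural (the caller passes enough fuel for the loop to reach its fixpoint)
def pvGrow (WordList : List String) : Nat → Int → Int → Int × Int
  | 0, w, h => (w, h)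
  | n + 1, w, h =>
    match pvOffender WordList w h with
    | none => (w, h)
    | some L => pvGrow WordList n (L + 1) (L + 5)

def GenDimensions_alt (WordList : List String) (Difficulty : String) (width : Int) (height : Int) : Int × Int :=
  let p := pvGrow WordList (((WordList.map (fun s => (PySem.Str.len s : Int))).foldl max 0 + 2 - min width height).toNat) width height
  let w := if (WordList.length : Int) ≥ p.1 then p.1 + 3 else p.1
  let bump := (PySem.Dict.ofList [("EASY", ((1 : Int), (1 : Int))), ("MEDIUM", (2, 3)), ("HARD", (4, 6))]).getD Difficulty (0, 0)
  (w + bump.1, p.2 + bump.2)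

-- ===== PRECONDITION & SPEC =====
def Spec_GenDimensions (WordList : List String) (Difficulty : String) (width : Int) (height : Int) (out : Int × Int) : Prop := out = GenDimensions_alt WordList Difficulty width height
instance (WordList : List String) (Difficulty : String) (width : Int) (height : Int) (out : Int × Int) : Decidable (Spec_GenDimensions WordList Difficulty width height out) := by unfold Spec_GenDimensions; infer_instance

-- ===== CLAIM (what is proved, stated in full; the proofs are below) =====
def Claim_equal_GenDimensions : Prop := ∀ (WordList : List String) (Difficulty : String) (width : Int) (height : Int), Dom_GenDimensions WordList Difficulty width height → Spec_GenDimensions WordList Difficulty width height (GenDimensions WordList Difficulty width height)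

-- ===== LEMMAS AND PROOFS =====

-- the body of A's loop, on word lengths
def pvStep (p : Int × Int) (L : Int) : Int × Int :=
  if L ≥ p.2 ∨ L ≥ p.1 then (L + 1, L + 5) else p

theorem pv_foldl_max_comm (l : List Int) : ∀ (x y : Int), l.foldl max (max x y) = max x (l.foldl max y) := by
  induction l with
  | nil => intro x y; rfl
  | cons b t ih =>
    intro x y
    show t.foldl max (max (max x y) b) = max x (t.foldl max (max y b))
    rw [max_assoc, ih]

-- A's running-threshold loop computes the max-based closed form
theorem pv_loop_char (lens : List Int) : ∀ (w h : Int),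
    lens.foldl pvStep (w, h) =
      (match lens with
       | [] => (w, h)
       | a :: rest =>
         if rest.foldl max a ≥ w ∨ rest.foldl max a ≥ h
         then (rest.foldl max a + 1, rest.foldl max a + 5) else (w, h)) := by
  induction lens with
  | nil => intro w h; rfl
  | cons a rest ih =>
    intro w h
    show rest.foldl pvStep (pvStep (w, h) a) = _
    cases rest with
    | nil =>
      simp only [List.foldl, pvStep]
      split_ifs <;> first | rfl | omega
    | cons b bs =>
      have hm : (b :: bs).foldl max a = max a (bs.foldl max b) := by
        show bs.foldl max (max a b) = _
        rw [pv_foldl_max_comm]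
      by_cases hc : (a : Int) ≥ h ∨ a ≥ w
      · have hs : pvStep (w, h) a = (a + 1, a + 5) := by simp [pvStep, hc]
        rw [hs, ih]
        simp only [hm]
        split_ifs <;> simp_all [Prod.mk.injEq] <;> omega
      · have hs : pvStep (w, h) a = (w, h) := by simp [pvStep, hc]
        rw [hs, ih]
        simp only [hm]
        split_ifs <;> simp_all [Prod.mk.injEq] <;> omega

theorem pv_loopA_eq (WordList : List String) (w h : Int) :
    WordList.foldl
      (fun (p : Int × Int) (word : String) =>
        if (PySem.Str.len word : Int) ≥ p.2 ∨ (PySem.Str.len word : Int) ≥ p.1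
        then ((PySem.Str.len word : Int) + 1, (PySem.Str.len word : Int) + 5)
        else p)
      (w, h)
    = (WordList.map (fun s => (PySem.Str.len s : Int))).foldl pvStep (w, h) := by
  rw [List.foldl_map]
  rfl

-- the maximum length of a nonempty list is attained by a member
theorem pv_foldl_max_mem (a : Int) (l : List Int) : l.foldl max a = a ∨ l.foldl max a ∈ l := by
  induction l generalizing a with
  | nil => exact Or.inl rfl
  | cons b t ih =>
    show t.foldl max (max a b) = a ∨ t.foldl max (max a b) ∈ b :: t
    rcases ih (max a b) with h | h
    · rw [h]
      rcases max_choice a b with hc | hc <;> rw [hc]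
      · exact Or.inl rfl
      · exact Or.inr List.mem_cons_self
    · exact Or.inr (List.mem_cons_of_mem _ h)

-- B's grow-until-fit loop computes the same closed form (on a nonempty list, with enough fuel)
theorem pvGrow_char (s : String) (ws : List String) : ∀ (n : Nat) (w h : Int),
    ((ws.map (fun t => (PySem.Str.len t : Int))).foldl max (PySem.Str.len s) + 2 - min w h).toNat ≤ n →
    pvGrow (s :: ws) n w h =
      (if (ws.map (fun t => (PySem.Str.len t : Int))).foldl max (PySem.Str.len s) ≥ w ∨
          (ws.map (fun t => (PySem.Str.len t : Int))).foldl max (PySem.Str.len s) ≥ h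
       then ((ws.map (fun t => (PySem.Str.len t : Int))).foldl max (PySem.Str.len s) + 1,
             (ws.map (fun t => (PySem.Str.len t : Int))).foldl max (PySem.Str.len s) + 5)
       else (w, h)) := by
  set m := (ws.map (fun t => (PySem.Str.len t : Int))).foldl max (PySem.Str.len s) with hmdef
  have hmem : ∃ word ∈ s :: ws, (PySem.Str.len word : Int) = m := by
    rcases pv_foldl_max_mem (PySem.Str.len s) (ws.map (fun t => (PySem.Str.len t : Int))) with h1 | h1
    · exact ⟨s, List.mem_cons_self, h1.symm⟩
    · rcases List.mem_map.mp h1 with ⟨word, hw, he⟩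
      exact ⟨word, List.mem_cons_of_mem _ hw, he⟩
  have hub : ∀ word ∈ s :: ws, (PySem.Str.len word : Int) ≤ m := by
    intro word hw
    rcases List.mem_cons.mp hw with rfl | hw
    · exact (PySem.List.le_foldl_max _ _).1
    · exact (PySem.List.le_foldl_max _ _).2 _ (List.mem_map_of_mem hw)
  clear hmdef
  intro n
  induction n with
  | zero =>
    intro w h hn
    rcases hmem with ⟨wd, hwd, hlen⟩
    have := hub wd hwd
    show (w, h) = _
    rw [if_neg (by omega)]
  | succ n ih =>
    intro w h hn
    show (match pvOffender (s :: ws) w h with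
          | none => (w, h)
          | some L => pvGrow (s :: ws) n (L + 1) (L + 5)) = _
    rcases ho : pvOffender (s :: ws) w h with _ | L
    · have hfn : (s :: ws).find? (fun word => decide (w ≤ (PySem.Str.len word : Int)) || decide (h ≤ (PySem.Str.len word : Int))) = none := by
        unfold pvOffender at ho
        rcases hf : (s :: ws).find? (fun word => decide (w ≤ (PySem.Str.len word : Int)) || decide (h ≤ (PySem.Str.len word : Int))) with _ | word
        · rfl
        · rw [hf] at ho; exact absurd ho (by simp)
      have hall := List.find?_eq_none.mp hfn
      rcases hmem with ⟨wd, hwd, hlen⟩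
      have := hall wd hwd
      simp only [Bool.or_eq_true, decide_eq_true_eq, not_or] at this
      rw [if_neg (by omega)]
    · have hex : ∃ word ∈ s :: ws, L = (PySem.Str.len word : Int) ∧ (w ≤ L ∨ h ≤ L) := by
        unfold pvOffender at ho
        rcases hf : (s :: ws).find? (fun word => decide (w ≤ (PySem.Str.len word : Int)) || decide (h ≤ (PySem.Str.len word : Int))) with _ | word
        · rw [hf] at ho; exact absurd ho (by simp)
        · rw [hf] at ho
          have hLv : L = (PySem.Str.len word : Int) := by cases ho; rfl
          have hp := List.find?_some hf
          simp only [Bool.or_eq_true, decide_eq_true_eq] at hp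
          exact ⟨word, List.mem_of_find?_eq_some hf, hLv, by omega⟩
      rcases hex with ⟨word, hwmem, hLv, hcond⟩
      have hLle : L ≤ m := hLv ▸ hub word hwmem
      show pvGrow (s :: ws) n (L + 1) (L + 5) = _
      rw [ih (L + 1) (L + 5) (by omega)]
      split_ifs with h1 h2 h2
      · rfl
      · exfalso; omega
      · have hLm : L = m := by omega
        rw [hLm]
      · exfalso; omega

-- with a nonnegative element present, the max with initial 0 is the plain max
theorem pv_foldl_max_zero (s : String) (ws : List String) :
    ((s :: ws).map (fun t => (PySem.Str.len t : Int))).foldl max 0 =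
      (ws.map (fun t => (PySem.Str.len t : Int))).foldl max (PySem.Str.len s) := by
  show (ws.map (fun t => (PySem.Str.len t : Int))).foldl max (max 0 (PySem.Str.len s)) = _
  rw [pv_foldl_max_comm]
  have h1 : (PySem.Str.len s : Int) ≤ (ws.map (fun t => (PySem.Str.len t : Int))).foldl max (PySem.Str.len s) :=
    (PySem.List.le_foldl_max _ _).1
  have h2 : (0 : Int) ≤ (PySem.Str.len s : Int) := Int.natCast_nonneg _
  omega

-- ===== VERDICT (by name: the statement is the Claim_ definition above) =====
theorem GenDimensions_spec : Claim_equal_GenDimensions := by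
  intro WordList Difficulty width height _
  unfold Spec_GenDimensions GenDimensions GenDimensions_alt
  rw [pv_loopA_eq, pv_loop_char]
  have hgrow : (match WordList.map (fun s => (PySem.Str.len s : Int)) with
       | [] => (width, height)
       | a :: rest =>
         if rest.foldl max a ≥ width ∨ rest.foldl max a ≥ height
         then (rest.foldl max a + 1, rest.foldl max a + 5) else (width, height))
      = pvGrow WordList (((WordList.map (fun s => (PySem.Str.len s : Int))).foldl max 0 + 2 - min width height).toNat) width height := by
    cases WordList with
    | nil =>
      cases ((([] : List String).map (fun s => (PySem.Str.len s : Int))).foldl max 0 + 2 - min width height).toNat with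
      | zero => rfl
      | succ n => rfl
    | cons s ws =>
      rw [pvGrow_char s ws _ width height (by rw [pv_foldl_max_zero])]
      simp only [List.map_cons]
  rw [hgrow]
  by_cases h1 : Difficulty = "TEST"
  · simp [h1, PySem.Dict.getD, PySem.Dict.get?, PySem.Dict.empty, PySem.Dict.update, PySem.Dict.insert, PySem.Dict.items, PySem.Dict.ofList]
  · by_cases h2 : Difficulty = "EASY"
    · simp [h1, h2, PySem.Dict.getD, PySem.Dict.get?, PySem.Dict.empty, PySem.Dict.update, PySem.Dict.insert, PySem.Dict.items, PySem.Dict.ofList]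
    · by_cases h3 : Difficulty = "MEDIUM"
      · simp [h1, h2, h3, PySem.Dict.getD, PySem.Dict.get?, PySem.Dict.empty, PySem.Dict.update, PySem.Dict.insert, PySem.Dict.items, PySem.Dict.ofList]
      · by_cases h4 : Difficulty = "HARD"
        · simp [h1, h2, h3, h4, PySem.Dict.getD, PySem.Dict.get?, PySem.Dict.empty, PySem.Dict.update, PySem.Dict.insert, PySem.Dict.items, PySem.Dict.ofList]
        · have e2 : ("EASY" == Difficulty) = false := by
            rw [beq_eq_false_iff_ne]; exact fun h => h2 h.symm
          have e3 : ("MEDIUM" == Difficulty) = false := by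
            rw [beq_eq_false_iff_ne]; exact fun h => h3 h.symm
          have e4 : ("HARD" == Difficulty) = false := by
            rw [beq_eq_false_iff_ne]; exact fun h => h4 h.symm
          simp [h1, h2, h3, h4, e2, e3, e4, PySem.Dict.getD, PySem.Dict.get?, PySem.Dict.empty, PySem.Dict.update, PySem.Dict.insert, PySem.Dict.items, PySem.Dict.ofList]
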